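-- pv_equiv track=rewrite | github.com/kylebegovich/ProjectEuler | Python/Solved/Page3+/Problem205.py | calc_wins
-- ===== SOURCE A (Python) =====
-- def calc_wins(distro1, distro2):
--     p1_wins = 0
--     l1 = len(distro1)
--     l2 = len(distro2)
--     for i in range(l1):
--         for j in range(l2):
--             if i > j:
--                 p1_wins += distro1[i] * distro2[j]
--
--     return p1_wins
-- ===== SOURCE B (Python) =====
-- def calc_wins(distro1, distro2):
--     total = 0
--     prefix = 0
--     for i, x in enumerate(distro1):
--         total += x * prefix
--         if i < len(distro2):
--             prefix += distro2[i]
--     return total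
-- ===== Notes on version B (the rewrite author's own statement) =====
-- stated objective: faster
-- what changed: Replaced the nested index loops (for each i, rescan all of distro2 testing i>j) by a single pass over distro1 that maintains a running prefix sum of distro2, so the inner scan disappears.
import Mathlib
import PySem

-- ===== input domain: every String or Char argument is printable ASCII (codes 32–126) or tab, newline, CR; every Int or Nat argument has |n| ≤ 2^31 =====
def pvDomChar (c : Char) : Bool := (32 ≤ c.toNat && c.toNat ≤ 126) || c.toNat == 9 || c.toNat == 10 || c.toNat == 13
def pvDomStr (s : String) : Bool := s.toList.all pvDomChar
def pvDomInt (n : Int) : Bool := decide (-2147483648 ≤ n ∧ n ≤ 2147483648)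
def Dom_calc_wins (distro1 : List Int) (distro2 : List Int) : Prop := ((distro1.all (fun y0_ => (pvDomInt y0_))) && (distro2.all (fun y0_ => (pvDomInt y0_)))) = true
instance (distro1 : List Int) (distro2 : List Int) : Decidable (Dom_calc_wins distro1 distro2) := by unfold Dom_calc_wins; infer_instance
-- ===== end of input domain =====

-- B replaces A's nested index scans by a single pass over distro1 with a running prefix sum of distro2 (asymptotically faster).
-- ===== PORT A =====
def calc_wins (distro1 : List Int) (distro2 : List Int) : Int :=
  let l1 : Int := distro1.length
  let l2 : Int := distro2.length
  (PySem.List.pyRange 0 l1 1).foldl (fun p1_wins i =>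
    (PySem.List.pyRange 0 l2 1).foldl (fun p j =>
      if i > j then p + PySem.List.pyGetD distro1 i 0 * PySem.List.pyGetD distro2 j 0 else p)
      p1_wins) 0

-- ===== PORT B =====
-- Python's `prefix` variable is named `pfx` here (`prefix` is a Lean keyword).
def calc_wins_alt (distro1 : List Int) (distro2 : List Int) : Int :=
  ((PySem.List.enumerate distro1 0).foldl (fun (s : Int × Int) ix =>
      let total := s.1 + ix.2 * s.2
      let pfx := if ix.1 < (distro2.length : Int) then s.2 + PySem.List.pyGetD distro2 ix.1 0 else s.2
      (total, pfx)) (0, 0)).1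

-- ===== PRECONDITION & SPEC =====
def Spec_calc_wins (distro1 : List Int) (distro2 : List Int) (out : Int) : Prop := out = calc_wins_alt distro1 distro2
instance (distro1 : List Int) (distro2 : List Int) (out : Int) : Decidable (Spec_calc_wins distro1 distro2 out) := by unfold Spec_calc_wins; infer_instance

-- ===== CLAIM (what is proved, stated in full; the proofs are below) =====
def Claim_equal_calc_wins : Prop := ∀ (distro1 : List Int) (distro2 : List Int), Dom_calc_wins distro1 distro2 → Spec_calc_wins distro1 distro2 (calc_wins distro1 distro2)

-- ===== LEMMAS AND PROOFS =====

/-- Common specification both loops compute: sum of x * (prefix sum of d2 up to the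
index of x), walking xs with starting index k. -/
def specSum (d2 : List Int) : List Int → Nat → Int
  | [], _ => 0
  | x :: xs, k => x * (d2.take k).sum + specSum d2 xs (k + 1)

lemma take_min (d2 : List Int) (k : Nat) : d2.take (min k d2.length) = d2.take k := by
  rw [← List.take_take, List.take_length]

lemma take_snoc {d : List Int} {n : Nat} (h : n < d.length) :
    d.take (n + 1) = d.take n ++ [d[n]] := by
  rw [List.take_add_one, List.getElem?_eq_getElem h]; rfl

lemma inner_loop (d2 : List Int) (a : Int) (i : Int) (hi : 0 ≤ i) :
    ∀ (n : Nat), n ≤ d2.length → ∀ (p : Int),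
      (PySem.List.pyRange 0 (n : Int) 1).foldl (fun p j =>
        if i > j then p + a * PySem.List.pyGetD d2 j 0 else p) p
      = p + a * (d2.take (min i.toNat n)).sum := by
  intro n
  induction n with
  | zero => intro _ p; simp [PySem.List.pyRange]
  | succ n ih =>
    intro hn p
    have h1 : ((n : Int)) + 1 = ((n + 1 : Nat) : Int) := by push_cast; ring
    rw [← h1, PySem.List.pyRange_one_succ_right (by positivity), List.foldl_append,
      ih (by omega) p]
    simp only [List.foldl_cons, List.foldl_nil]
    by_cases hcase : i > (n : Int)
    · have hmin1 : min i.toNat (n + 1) = n + 1 := by omega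
      have hmin2 : min i.toNat n = n := by omega
      rw [if_pos hcase, hmin1, hmin2, take_snoc (by omega), List.sum_append,
        PySem.List.pyGetD_natCast, List.getD_eq_getElem d2 0 (by omega)]
      simp only [List.sum_cons, List.sum_nil]
      ring
    · have hmin : min i.toNat (n + 1) = min i.toNat n := by omega
      rw [if_neg hcase, hmin]

lemma specSum_append_singleton (d2 : List Int) (xs : List Int) (x : Int) :
    ∀ k, specSum d2 (xs ++ [x]) k = specSum d2 xs k + x * (d2.take (k + xs.length)).sum := by
  induction xs with
  | nil => intro k; simp [specSum]
  | cons y ys ih =>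
    intro k
    have hk : k + 1 + ys.length = k + (ys.length + 1) := by omega
    simp only [List.cons_append, specSum, ih (k + 1), List.length_cons, hk]
    all_goals ring

lemma outer_loop (d1 d2 : List Int) :
    ∀ (n : Nat), n ≤ d1.length → ∀ (p : Int),
      (PySem.List.pyRange 0 (n : Int) 1).foldl (fun p1_wins i =>
        (PySem.List.pyRange 0 (d2.length : Int) 1).foldl (fun p j =>
          if i > j then p + PySem.List.pyGetD d1 i 0 * PySem.List.pyGetD d2 j 0 else p)
          p1_wins) p
      = p + specSum d2 (d1.take n) 0 := by
  intro n
  induction n with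
  | zero => intro _ p; simp [PySem.List.pyRange, specSum]
  | succ n ih =>
    intro hn p
    have h1 : ((n : Int)) + 1 = ((n + 1 : Nat) : Int) := by push_cast; ring
    rw [← h1, PySem.List.pyRange_one_succ_right (by positivity), List.foldl_append,
      ih (by omega) p]
    simp only [List.foldl_cons, List.foldl_nil]
    rw [inner_loop d2 (PySem.List.pyGetD d1 (n : Int) 0) (n : Int) (by positivity)
      d2.length le_rfl, Int.toNat_natCast, take_min, take_snoc (show n < d1.length by omega),
      specSum_append_singleton, List.length_take_of_le (by omega),
      PySem.List.pyGetD_natCast, List.getD_eq_getElem d1 0 (by omega)]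
    simp only [Nat.zero_add]
    ring

lemma prefix_step (d2 : List Int) (k : Nat) :
    (if (k : Int) < (d2.length : Int) then (d2.take k).sum + PySem.List.pyGetD d2 (k : Int) 0
     else (d2.take k).sum) = (d2.take (k + 1)).sum := by
  by_cases h : k < d2.length
  · rw [if_pos (by exact_mod_cast h), PySem.List.pyGetD_natCast,
      List.getD_eq_getElem d2 0 h, take_snoc h, List.sum_append]
    simp
  · rw [if_neg (by exact_mod_cast h), List.take_of_length_le (by omega),
      List.take_of_length_le (by omega)]

lemma B_loop (d2 : List Int) :
    ∀ (xs : List Int) (k : Nat) (t : Int),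
      ((PySem.List.enumerate xs (k : Int)).foldl (fun (s : Int × Int) ix =>
          let total := s.1 + ix.2 * s.2
          let pfx := if ix.1 < (d2.length : Int) then s.2 + PySem.List.pyGetD d2 ix.1 0 else s.2
          (total, pfx)) (t, (d2.take k).sum)).1
      = t + specSum d2 xs k := by
  intro xs
  induction xs with
  | nil => intro k t; simp [PySem.List.enumerate, specSum]
  | cons x xs ih =>
    intro k t
    rw [PySem.List.enumerate_cons, List.foldl_cons]
    simp only
    rw [prefix_step d2 k]
    have h1 : ((k : Int)) + 1 = ((k + 1 : Nat) : Int) := by push_cast; ring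
    rw [h1, ih (k + 1) (t + x * (d2.take k).sum)]
    simp [specSum]; ring

-- ===== VERDICT (by name: the statement is the Claim_ definition above) =====
theorem calc_wins_spec : Claim_equal_calc_wins := by
  intro d1 d2 _
  unfold Spec_calc_wins calc_wins calc_wins_alt
  simp only
  rw [outer_loop d1 d2 d1.length le_rfl 0, List.take_length]
  have := B_loop d2 d1 0 0
  simp only [Nat.cast_zero, List.take_zero, List.sum_nil] at this
  rw [this]
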